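-- pv_equiv track=rewrite | github.com/ArmanNawaz/Leetcode-GFG | 2201-count-artifacts-that-can-be-extracted/2201-count-artifacts-that-can-be-extracted.py | digArtifacts
-- ===== SOURCE A (Python) =====
-- from typing import List
--
-- def digArtifacts(n: int, artifacts: List[List[int]], dig: List[List[int]]) -> int:
--     digSet = set()
--
--     # create set for given dig points to have constant time lookup for any coordinate
--     for each in dig:
--         digSet.add(tuple(each))
--
--     ans = 0
--
--     # iterate through the artifacts
--     for point in artifacts:
--
--         point1 = point[ : 2] # starting cell
--         point2 = point[2 : ] # ending cell
--
--         # initially assume that we can visit all cells in current rectangle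
--         completeVisit = True
--
--         # iterate through each rectangle of the current artifact
--         for x in range(point1[0], point2[0] + 1):
--             for y in range(point1[1], point2[1] + 1):
--
--                 # If current cell cannot be digged then break immediately
--                 if (x, y) not in digSet:
--                     completeVisit = False
--
--         # If all the cells can be visited, increment the answer
--         if completeVisit:
--             ans += 1
--
--     return ans
-- ===== SOURCE B (Python) =====
-- def digArtifacts(n, artifacts, dig):
--     # Loop over the (deduplicated) dig cells per artifact instead of scanning
--     # every rectangle cell: count dug cells inside the rectangle arithmetically
--     # and compare with the closed-form area.
--     dug = {tuple(d) for d in dig}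
--     ans = 0
--     for a in artifacts:
--         x1, y1, x2, y2 = a[0], a[1], a[2], a[3]
--         area = max(0, x2 - x1 + 1) * max(0, y2 - y1 + 1)
--         inside = 0
--         for c in dug:
--             if len(c) == 2 and x1 <= c[0] <= x2 and y1 <= c[1] <= y2:
--                 inside += 1
--         if inside == area:
--             ans += 1
--     return ans
-- ===== Notes on version B (the rewrite author's own statement) =====
-- stated objective: faster
-- what changed: B reverses the traversal: instead of scanning every cell of each artifact's rectangle against a dig-set, it loops over the deduplicated dig cells once per artifact, counting those inside the rectangle arithmetically, and compares the count with the closed-form rectangle area.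
-- outside the precondition, e.g. on digArtifacts(0, [[1, 5, 0]], []): A returns 1, B raises IndexError
import Mathlib
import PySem

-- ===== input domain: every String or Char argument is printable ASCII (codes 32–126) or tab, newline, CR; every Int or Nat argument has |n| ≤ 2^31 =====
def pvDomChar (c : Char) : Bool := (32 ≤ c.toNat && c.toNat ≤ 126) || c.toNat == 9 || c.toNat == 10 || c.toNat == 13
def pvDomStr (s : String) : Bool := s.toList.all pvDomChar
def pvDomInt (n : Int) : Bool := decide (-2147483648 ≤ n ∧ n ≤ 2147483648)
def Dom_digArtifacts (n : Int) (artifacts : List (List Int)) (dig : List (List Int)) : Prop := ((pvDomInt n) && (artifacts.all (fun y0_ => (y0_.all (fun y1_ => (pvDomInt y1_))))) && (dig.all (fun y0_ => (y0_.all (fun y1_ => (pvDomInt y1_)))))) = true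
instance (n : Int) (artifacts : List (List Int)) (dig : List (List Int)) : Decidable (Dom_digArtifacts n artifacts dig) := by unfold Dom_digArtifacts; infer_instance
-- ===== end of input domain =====

-- B counts the deduplicated dig cells lying inside each artifact's rectangle and compares
-- with the closed-form rectangle area, instead of scanning every rectangle cell against a dig-set.

-- ===== PORT A =====
def digArtifacts (n : Int) (artifacts : List (List Int)) (dig : List (List Int)) : Int :=
  let digSet : PySem.Set (List Int) := dig.foldl (fun s each => PySem.Set.add s each) PySem.Set.empty
  artifacts.foldl (fun ans point =>
    let point1 := PySem.List.slice point none (some 2)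
    let point2 := PySem.List.slice point (some 2) none
    let completeVisit :=
      (PySem.List.pyRange (PySem.List.pyGetD point1 0 0) (PySem.List.pyGetD point2 0 0 + 1) 1).foldl
        (fun cv x =>
          (PySem.List.pyRange (PySem.List.pyGetD point1 1 0) (PySem.List.pyGetD point2 1 0 + 1) 1).foldl
            (fun cv y => if !(PySem.Set.contains digSet [x, y]) then false else cv) cv)
        true
    if completeVisit then ans + 1 else ans) 0

-- ===== PORT B =====
def digArtifacts_alt (n : Int) (artifacts : List (List Int)) (dig : List (List Int)) : Int :=
  let dug : PySem.Set (List Int) := PySem.Set.ofList dig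
  artifacts.foldl (fun ans a =>
    let x1 := PySem.List.pyGetD a 0 0
    let y1 := PySem.List.pyGetD a 1 0
    let x2 := PySem.List.pyGetD a 2 0
    let y2 := PySem.List.pyGetD a 3 0
    let area := max 0 (x2 - x1 + 1) * max 0 (y2 - y1 + 1)
    let inside := dug.foldl (fun c cell =>
      if cell.length = 2 ∧ x1 ≤ PySem.List.pyGetD cell 0 0 ∧ PySem.List.pyGetD cell 0 0 ≤ x2 ∧
          y1 ≤ PySem.List.pyGetD cell 1 0 ∧ PySem.List.pyGetD cell 1 0 ≤ y2
      then c + 1 else c) 0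
    if inside = area then ans + 1 else ans) 0

-- ===== PRECONDITION & SPEC =====
-- Pre_ excludes artifact rows with fewer than 4 entries: the Python A raises IndexError on them,
-- except in the degenerate length-3 case with an empty row-range, where A returns but B's tuple
-- unpacking raises (see claim cites).
def Pre_digArtifacts (n : Int) (artifacts : List (List Int)) (dig : List (List Int)) : Prop :=
  ∀ a ∈ artifacts, 4 ≤ a.length
instance (n : Int) (artifacts : List (List Int)) (dig : List (List Int)) : Decidable (Pre_digArtifacts n artifacts dig) := by unfold Pre_digArtifacts; infer_instance

def pvWitness_digArtifacts : Int × List (List Int) × List (List Int) :=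
  (2, [[0, 0, 0, 1], [1, 1, 1, 1]], [[0, 0], [0, 1], [1, 1]])

def Spec_digArtifacts (n : Int) (artifacts : List (List Int)) (dig : List (List Int)) (out : Int) : Prop := out = digArtifacts_alt n artifacts dig
instance (n : Int) (artifacts : List (List Int)) (dig : List (List Int)) (out : Int) : Decidable (Spec_digArtifacts n artifacts dig out) := by unfold Spec_digArtifacts; infer_instance

-- ===== CLAIM (what is proved, stated in full; the proofs are below) =====
def Claim_equal_digArtifacts : Prop := ∀ (n : Int) (artifacts : List (List Int)) (dig : List (List Int)), Dom_digArtifacts n artifacts dig → Pre_digArtifacts n artifacts dig → Spec_digArtifacts n artifacts dig (digArtifacts n artifacts dig)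

-- ===== LEMMAS AND PROOFS =====

-- index arithmetic relating A's slices to B's direct indexing
theorem pyGetD_take2_zero (l : List Int) : PySem.List.pyGetD (l.take 2) 0 0 = PySem.List.pyGetD l 0 0 := by
  rw [PySem.List.pyGetD_of_nonneg _ _ (by norm_num), PySem.List.pyGetD_of_nonneg _ _ (by norm_num)]
  match l with
  | [] => rfl
  | a :: t => rfl

theorem pyGetD_take2_one (l : List Int) : PySem.List.pyGetD (l.take 2) 1 0 = PySem.List.pyGetD l 1 0 := by
  rw [PySem.List.pyGetD_of_nonneg _ _ (by norm_num), PySem.List.pyGetD_of_nonneg _ _ (by norm_num)]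
  match l with
  | [] => rfl
  | [a] => rfl
  | a :: b :: t => rfl

theorem pyGetD_drop2_zero (l : List Int) : PySem.List.pyGetD (l.drop 2) 0 0 = PySem.List.pyGetD l 2 0 := by
  rw [PySem.List.pyGetD_of_nonneg _ _ (by norm_num), PySem.List.pyGetD_of_nonneg _ _ (by norm_num)]
  match l with
  | [] => rfl
  | [a] => rfl
  | a :: b :: t => rfl

theorem pyGetD_drop2_one (l : List Int) : PySem.List.pyGetD (l.drop 2) 1 0 = PySem.List.pyGetD l 3 0 := by
  rw [PySem.List.pyGetD_of_nonneg _ _ (by norm_num), PySem.List.pyGetD_of_nonneg _ _ (by norm_num)]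
  match l with
  | [] => rfl
  | [a] => rfl
  | [a, b] => rfl
  | a :: b :: c :: t => rfl

theorem eq_pair_of_length_two (c : List Int) (h : c.length = 2) :
    c = [PySem.List.pyGetD c 0 0, PySem.List.pyGetD c 1 0] := by
  match c with
  | [a, b] =>
    rw [PySem.List.pyGetD_of_nonneg _ _ (by norm_num), PySem.List.pyGetD_of_nonneg _ _ (by norm_num)]
    rfl

-- the per-artifact core of B: the number of distinct dug cells inside the rectangle equals the
-- closed-form area iff every rectangle cell is dug
theorem count_eq_area_iff (S : List (List Int)) (hS : S.Nodup) (x1 y1 x2 y2 : Int) :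
    ((S.countP (fun c => decide (c.length = 2 ∧ x1 ≤ PySem.List.pyGetD c 0 0 ∧ PySem.List.pyGetD c 0 0 ≤ x2 ∧
        y1 ≤ PySem.List.pyGetD c 1 0 ∧ PySem.List.pyGetD c 1 0 ≤ y2)) : Int)
      = max 0 (x2 - x1 + 1) * max 0 (y2 - y1 + 1))
    ↔ (∀ x y : Int, x1 ≤ x → x ≤ x2 → y1 ≤ y → y ≤ y2 → [x, y] ∈ S) := by
  set p : List Int → Bool := fun c => decide (c.length = 2 ∧ x1 ≤ PySem.List.pyGetD c 0 0 ∧ PySem.List.pyGetD c 0 0 ≤ x2 ∧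
      y1 ≤ PySem.List.pyGetD c 1 0 ∧ PySem.List.pyGetD c 1 0 ≤ y2) with hp
  set g : List Int → Int × Int := fun c => (PySem.List.pyGetD c 0 0, PySem.List.pyGetD c 1 0) with hg
  set T : Finset (Int × Int) := Finset.Icc x1 x2 ×ˢ Finset.Icc y1 y2 with hT
  set F : Finset (Int × Int) := T.filter (fun q => [q.1, q.2] ∈ S) with hF
  have hpq : ∀ q : Int × Int, p [q.1, q.2] = true ↔ (x1 ≤ q.1 ∧ q.1 ≤ x2) ∧ y1 ≤ q.2 ∧ q.2 ≤ y2 := by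
    intro q
    simp [hp, PySem.List.pyGetD_of_nonneg _ _ (by norm_num : (0:Int) ≤ 0),
      PySem.List.pyGetD_of_nonneg _ _ (by norm_num : (0:Int) ≤ 1)]
    tauto
  have himg : (S.filter p).toFinset.image g = F := by
    ext q
    simp only [Finset.mem_image, List.mem_toFinset, List.mem_filter, hF, Finset.mem_filter, hT,
      Finset.mem_product, Finset.mem_Icc]
    constructor
    · rintro ⟨c, ⟨hcS, hcp⟩, hq⟩
      have hlen : c.length = 2 := by simpa [hp] using (of_decide_eq_true hcp).1
      have hc2 : c = [q.1, q.2] := by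
        rw [eq_pair_of_length_two c hlen]; rw [← hq]
      have := (hpq q).mp (by rwa [← hc2])
      exact ⟨⟨this.1, this.2⟩, by rwa [← hc2]⟩
    · rintro ⟨hb, hmem⟩
      refine ⟨[q.1, q.2], ⟨hmem, (hpq q).mpr ⟨hb.1, hb.2⟩⟩, ?_⟩
      simp [hg, PySem.List.pyGetD_of_nonneg _ _ (by norm_num : (0:Int) ≤ 0),
        PySem.List.pyGetD_of_nonneg _ _ (by norm_num : (0:Int) ≤ 1)]
  have hinj : Set.InjOn g ↑((S.filter p).toFinset) := by
    intro c hc c' hc' hgc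
    simp only [List.coe_toFinset, Set.mem_setOf_eq, List.mem_filter] at hc hc'
    have h2 : c.length = 2 := by simpa [hp] using (of_decide_eq_true hc.2).1
    have h2' : c'.length = 2 := by simpa [hp] using (of_decide_eq_true hc'.2).1
    rw [eq_pair_of_length_two c h2, eq_pair_of_length_two c' h2']
    have e1 : PySem.List.pyGetD c 0 0 = PySem.List.pyGetD c' 0 0 := congrArg Prod.fst hgc
    have e2 : PySem.List.pyGetD c 1 0 = PySem.List.pyGetD c' 1 0 := congrArg Prod.snd hgc
    rw [e1, e2]
  have hcount : S.countP p = F.card := by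
    rw [← himg, Finset.card_image_of_injOn hinj, List.toFinset_card_of_nodup (hS.filter p),
      List.countP_eq_length_filter]
  have harea : max 0 (x2 - x1 + 1) * max 0 (y2 - y1 + 1) = (T.card : Int) := by
    have h1 : (((x2 + 1 - x1).toNat : Int)) = max 0 (x2 - x1 + 1) := by omega
    have h2 : (((y2 + 1 - y1).toNat : Int)) = max 0 (y2 - y1 + 1) := by omega
    rw [hT, Finset.card_product, Int.card_Icc, Int.card_Icc]
    push_cast
    rw [h1, h2]
  rw [hcount, harea]
  have hFT : F ⊆ T := Finset.filter_subset _ _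
  constructor
  · intro h x y h1 h2 h3 h4
    have hcard : T.card ≤ F.card := le_of_eq (by exact_mod_cast h.symm)
    have hEq : F = T := Finset.eq_of_subset_of_card_le hFT hcard
    have hxyT : (x, y) ∈ T := by
      simp [hT, Finset.mem_product, Finset.mem_Icc]; exact ⟨⟨h1, h2⟩, h3, h4⟩
    have hm : (x, y) ∈ F := hEq ▸ hxyT
    exact (Finset.mem_filter.mp hm).2
  · intro h
    have hEq : F = T := by
      apply Finset.filter_eq_self.mpr
      intro q hq
      simp only [hT, Finset.mem_product, Finset.mem_Icc] at hq
      exact h q.1 q.2 hq.1.1 hq.1.2 hq.2.1 hq.2.2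
    rw [hEq]

-- the per-artifact core of A: the nested flag loop tests every rectangle cell for membership
theorem flag_eq (S : PySem.Set (List Int)) (x1 y1 x2 y2 : Int) :
    (PySem.List.pyRange x1 (x2 + 1) 1).foldl
      (fun cv x => (PySem.List.pyRange y1 (y2 + 1) 1).foldl
        (fun cv y => if !(PySem.Set.contains S [x, y]) then false else cv) cv) true = true
    ↔ (∀ x y : Int, x1 ≤ x → x ≤ x2 → y1 ≤ y → y ≤ y2 → [x, y] ∈ S) := by
  have hinner : ∀ (cv : Bool) (x : Int),
      (PySem.List.pyRange y1 (y2 + 1) 1).foldl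
        (fun cv y => if !(PySem.Set.contains S [x, y]) then false else cv) cv
      = (cv && !(PySem.List.pyRange y1 (y2 + 1) 1).any (fun y => !(PySem.Set.contains S [x, y]))) :=
    fun cv x => PySem.List.foldl_if_false_eq _ _ cv
  have hsw : ∀ (cv q : Bool), (cv && !q) = if q = true then false else cv := by decide
  simp only [hinner, hsw]
  rw [PySem.List.foldl_if_false_eq]
  simp only [Bool.true_and, Bool.not_eq_eq_eq_not, Bool.not_true, List.any_eq_false,
    PySem.List.mem_pyRange_one]
  constructor
  · intro h x y hx1 hx2 hy1 hy2
    have h2 := h x ⟨hx1, by omega⟩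
    simp only [List.any_eq_true, not_exists, not_and, PySem.List.mem_pyRange_one] at h2
    have h3 := h2 y ⟨hy1, by omega⟩
    simpa [PySem.Set.contains] using h3
  · intro h x hx
    simp only [List.any_eq_true, not_exists, not_and, PySem.List.mem_pyRange_one]
    intro y hy
    simp only [Bool.not_eq_true', Bool.not_eq_false]
    simpa [PySem.Set.contains] using h x y hx.1 (by omega) hy.1 (by omega)

-- ===== VERDICT (by name: the statement is the Claim_ definition above) =====
theorem digArtifacts_spec : Claim_equal_digArtifacts := by
  intro n artifacts dig _ _
  unfold Spec_digArtifacts digArtifacts digArtifacts_alt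
  have hset : dig.foldl (fun s each => PySem.Set.add s each) PySem.Set.empty = PySem.Set.ofList dig :=
    (PySem.Set.ofList_eq_foldl dig).symm
  dsimp only
  rw [hset]
  apply PySem.List.foldl_congr_mem
  intro ans a _
  have hsl1 : PySem.List.slice a none (some 2) = a.take 2 := by simp [pysem]
  have hsl2 : PySem.List.slice a (some 2) none = a.drop 2 := by simp [pysem]
  rw [hsl1, hsl2, pyGetD_take2_zero, pyGetD_take2_one, pyGetD_drop2_zero, pyGetD_drop2_one,
    PySem.List.foldl_ite_add_one]
  have hiff := (count_eq_area_iff (PySem.Set.ofList dig) (PySem.Set.nodup_ofList dig)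
      (PySem.List.pyGetD a 0 0) (PySem.List.pyGetD a 1 0) (PySem.List.pyGetD a 2 0) (PySem.List.pyGetD a 3 0))
  have hflag := flag_eq (PySem.Set.ofList dig)
      (PySem.List.pyGetD a 0 0) (PySem.List.pyGetD a 1 0) (PySem.List.pyGetD a 2 0) (PySem.List.pyGetD a 3 0)
  rw [zero_add]
  by_cases hc : ∀ x y : Int, PySem.List.pyGetD a 0 0 ≤ x → x ≤ PySem.List.pyGetD a 2 0 →
      PySem.List.pyGetD a 1 0 ≤ y → y ≤ PySem.List.pyGetD a 3 0 → [x, y] ∈ PySem.Set.ofList dig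
  · rw [if_pos (hflag.mpr hc), if_pos (hiff.mpr hc)]
  · rw [if_neg (fun h => hc (hflag.mp h)), if_neg (fun h => hc (hiff.mp h))]
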